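-- pv_equiv track=rewrite | github.com/Tousifrahmananto/CodeSwitch | codeswitch/converter/services.py | _py_indent_level
-- ===== SOURCE A (Python) =====
-- def _py_indent_level(line):
--     """Return Python indent level (4 spaces or 1 tab = 1 level)."""
--     count = 0
--     for ch in line:
--         if ch == ' ':
--             count += 1
--         elif ch == '\t':
--             count += 4
--         else:
--             break
--     return count // 4
-- ===== SOURCE B (Python) =====
-- def _py_indent_level(line):
--     """Return Python indent level (4 spaces or 1 tab = 1 level)."""
--     stripped = line.lstrip(' \t')
--     prefix = line[:len(line) - len(stripped)]
--     return (prefix.count(' ') + 4 * prefix.count('\t')) // 4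
-- ===== Notes on version B (the rewrite author's own statement) =====
-- stated objective: idiomatic
-- what changed: B extracts the leading space/tab prefix with str.lstrip and slicing and counts it with str.count, instead of A's single early-breaking char loop with an accumulator.
import Mathlib
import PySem

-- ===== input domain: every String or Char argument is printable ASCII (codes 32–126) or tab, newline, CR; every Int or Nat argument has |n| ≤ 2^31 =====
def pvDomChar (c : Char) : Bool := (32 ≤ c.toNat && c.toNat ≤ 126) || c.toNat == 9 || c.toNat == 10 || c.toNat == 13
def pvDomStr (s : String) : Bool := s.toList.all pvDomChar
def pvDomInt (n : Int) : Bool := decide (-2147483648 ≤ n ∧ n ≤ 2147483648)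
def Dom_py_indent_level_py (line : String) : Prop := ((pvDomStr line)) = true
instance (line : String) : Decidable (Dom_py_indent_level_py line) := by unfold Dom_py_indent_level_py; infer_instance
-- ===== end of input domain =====

-- B computes the indent by stripping the leading space/tab prefix with lstrip/slicing and
-- counting it with string counts, instead of A's early-breaking accumulator loop (idiomatic).

-- ===== PORT A =====
-- the 'for ch in line: … break' loop, as structural recursion over the chars
def pyIndentLoop : List Char → Int → Int
  | [], count => count
  | c :: rest, count =>
    if c = ' ' then pyIndentLoop rest (count + 1)
    else if c = '\t' then pyIndentLoop rest (count + 4)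
    else count

def py_indent_level_py (line : String) : Int :=
  PySem.Int.floordiv (pyIndentLoop line.toList 0) 4

-- ===== PORT B =====
def py_indent_level_py_alt (line : String) : Int :=
  -- line.lstrip(' \t') ported by hand as dropWhile over the chars (exact: lstrip(chars)
  -- removes exactly the longest leading run of chars from the set)
  let stripped : List Char := line.toList.dropWhile (fun c => c == ' ' || c == '\t')
  let pfx : List Char :=
    PySem.List.slice line.toList none (some ((line.toList.length : Int) - (stripped.length : Int)))
  PySem.Int.floordiv ((PySem.Chars.count pfx [' '] : Int) + 4 * (PySem.Chars.count pfx ['\t'] : Int)) 4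

-- ===== PRECONDITION & SPEC =====
def Spec_py_indent_level_py (line : String) (out : Int) : Prop := out = py_indent_level_py_alt line
instance (line : String) (out : Int) : Decidable (Spec_py_indent_level_py line out) := by unfold Spec_py_indent_level_py; infer_instance

-- ===== CLAIM (what is proved, stated in full; the proofs are below) =====
def Claim_equal_py_indent_level_py : Prop := ∀ (line : String), Dom_py_indent_level_py line → Spec_py_indent_level_py line (py_indent_level_py line)

-- ===== LEMMAS AND PROOFS =====

theorem pyIndentLoop_eq (cs : List Char) (acc : Int) :
    pyIndentLoop cs acc =
      acc + ((cs.takeWhile (fun c => c == ' ' || c == '\t')).count ' ' : Int)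
          + 4 * ((cs.takeWhile (fun c => c == ' ' || c == '\t')).count '\t' : Int) := by
  induction cs generalizing acc with
  | nil => simp [pyIndentLoop]
  | cons c rest ih =>
    by_cases hs : c = ' '
    · subst hs
      simp [pyIndentLoop, ih, List.takeWhile, List.count_cons]
      ring
    · by_cases ht : c = '\t'
      · subst ht
        simp [pyIndentLoop, ih, List.takeWhile, List.count_cons]
        ring
      · have : (c == ' ' || c == '\t') = false := by
          simp [hs, ht]
        simp [pyIndentLoop, hs, ht, List.takeWhile, this]

theorem prefix_eq (cs : List Char) :
    PySem.List.slice cs none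
        (some ((cs.length : Int) - ((cs.dropWhile (fun c => c == ' ' || c == '\t')).length : Int)))
      = cs.takeWhile (fun c => c == ' ' || c == '\t') := by
  have hsum : (cs.takeWhile (fun c => c == ' ' || c == '\t')).length
      + (cs.dropWhile (fun c => c == ' ' || c == '\t')).length = cs.length := by
    rw [← List.length_append, List.takeWhile_append_dropWhile]
  have hcast : ((cs.length : Int) - ((cs.dropWhile (fun c => c == ' ' || c == '\t')).length : Int))
      = (((cs.takeWhile (fun c => c == ' ' || c == '\t')).length : Nat) : Int) := by
    omega
  rw [hcast, PySem.List.slice_to]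
  · simp only [Int.toNat_natCast]
    exact (List.prefix_iff_eq_take.mp (List.takeWhile_prefix _)).symm
  · exact Int.natCast_nonneg _

theorem count_go_single (c : Char) (fuel : Nat) : ∀ (l : List Char) (acc : Nat), l.length ≤ fuel →
    PySem.Chars.count.go [c] fuel l acc = acc + l.count c := by
  induction fuel with
  | zero => intro l acc h; rw [List.length_eq_zero_iff.mp (Nat.le_zero.mp h)]; simp [PySem.Chars.count.go]
  | succ n ih =>
    intro l acc h
    cases l with
    | nil => simp [PySem.Chars.count.go]
    | cons d t =>
      rw [PySem.Chars.count.go]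
      by_cases hd : d = c
      · subst hd
        simp [List.isPrefixOf, ih t _ (by simpa using h)]
        omega
      · have hp : List.isPrefixOf [c] (d :: t) = false := by
          simp [List.isPrefixOf, Ne.symm hd]
        simp [hp, hd, ih t _ (by simpa using h)]

theorem chars_count_single (cs : List Char) (c : Char) :
    PySem.Chars.count cs [c] = cs.count c := by
  simp [PySem.Chars.count, count_go_single c cs.length cs 0 le_rfl]

-- ===== VERDICT (by name: the statement is the Claim_ definition above) =====
theorem py_indent_level_py_spec : Claim_equal_py_indent_level_py := by
  intro line _
  simp only [Spec_py_indent_level_py, py_indent_level_py, py_indent_level_py_alt]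
  rw [prefix_eq, pyIndentLoop_eq, chars_count_single, chars_count_single]
  ring_nf
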